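-- pv_equiv track=rewrite | github.com/Louis0620Chr/algorithmic-trading-simulator | src/metric_finder.py | build_ema_combinations
-- ===== SOURCE A (Python) =====
-- from typing import List, Tuple
--
-- def build_ema_combinations(
--     fast_ema_periods: List[int], medium_ema_periods: List[int], slow_ema_periods: List[int]
-- ) -> List[Tuple[int, int, int]]:
--     ema_combinations = []
--     for fast_ema_period in fast_ema_periods:
--         for medium_ema_period in medium_ema_periods:
--             for slow_ema_period in slow_ema_periods:
--                 if fast_ema_period < medium_ema_period and fast_ema_period < slow_ema_period:
--                     ema_combinations.append(
--                         (fast_ema_period, medium_ema_period, slow_ema_period)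
--                     )
--     return ema_combinations
-- ===== SOURCE B (Python) =====
-- def build_ema_combinations(fast_ema_periods, medium_ema_periods, slow_ema_periods):
--     # Inverted traversal: iterate (medium, slow) pairs once; for each pair the
--     # qualifying fasts are exactly those below min(medium, slow), so walk the
--     # fast indices in ascending value order and stop at the first non-qualifier,
--     # appending the triple to a per-fast-index bucket; concatenating the buckets
--     # restores A's fast-major output order.
--     order = sorted(range(len(fast_ema_periods)), key=lambda i: fast_ema_periods[i])
--     buckets = [[] for _ in fast_ema_periods]
--     for medium in medium_ema_periods:
--         for slow in slow_ema_periods: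
--             threshold = medium if medium < slow else slow
--             for i in order:
--                 fast = fast_ema_periods[i]
--                 if fast >= threshold:
--                     break
--                 buckets[i].append((fast, medium, slow))
--     result = []
--     for bucket in buckets:
--         result.extend(bucket)
--     return result
-- ===== Notes on version B (the rewrite author's own statement) =====
-- stated objective: alternative
-- what changed: B inverts the traversal: instead of A's fast-major triple loop testing the conjunction per triple, it iterates the (medium, slow) pairs once, walks the fast indices in ascending fast-value order stopping at the first fast >= min(medium, slow), appends into per-fast-index buckets, and concatenates the buckets to restore A's order; the scan per pair touches only qualifying fasts plus one.
import Mathlib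
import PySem

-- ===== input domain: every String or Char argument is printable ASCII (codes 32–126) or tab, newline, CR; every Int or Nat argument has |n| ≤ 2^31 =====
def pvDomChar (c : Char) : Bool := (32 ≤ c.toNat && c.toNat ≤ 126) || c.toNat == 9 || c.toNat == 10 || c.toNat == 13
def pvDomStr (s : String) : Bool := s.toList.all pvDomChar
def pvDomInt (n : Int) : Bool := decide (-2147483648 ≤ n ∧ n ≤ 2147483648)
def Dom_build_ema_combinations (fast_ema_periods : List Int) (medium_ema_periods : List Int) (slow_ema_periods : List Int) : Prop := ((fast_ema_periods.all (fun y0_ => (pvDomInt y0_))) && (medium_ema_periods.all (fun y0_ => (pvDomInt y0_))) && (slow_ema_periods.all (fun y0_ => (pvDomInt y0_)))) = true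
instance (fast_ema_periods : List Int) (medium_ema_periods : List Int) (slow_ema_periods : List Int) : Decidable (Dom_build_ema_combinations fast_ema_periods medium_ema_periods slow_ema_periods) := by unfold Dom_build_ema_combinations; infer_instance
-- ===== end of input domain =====

-- B inverts the traversal: it iterates the (medium, slow) pairs once, and for each pair walks the
-- fast indices in ascending fast-value order, stopping at the first fast ≥ min(medium, slow) and
-- appending into per-fast-index buckets; concatenating the buckets restores A's output order.
-- Objective: alternative (early termination on sorted fasts; equality of return values is proved).


-- ===== PORT A =====
-- Literal transliteration of A: triple nested loop appending when both comparisons hold.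
def build_ema_combinations (fast_ema_periods : List Int) (medium_ema_periods : List Int) (slow_ema_periods : List Int) : List (Int × Int × Int) :=
  fast_ema_periods.foldl (fun acc fast_ema_period =>
    medium_ema_periods.foldl (fun acc medium_ema_period =>
      slow_ema_periods.foldl (fun acc slow_ema_period =>
        if fast_ema_period < medium_ema_period ∧ fast_ema_period < slow_ema_period then
          acc ++ [(fast_ema_period, medium_ema_period, slow_ema_period)]
        else acc) acc) acc) []

-- ===== PORT B =====
-- B's inner 'for i in order: … break' loop: walk the value-sorted fast indices, stop at the
-- first fast ≥ threshold, append the triple to bucket i otherwise. Indices come from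
-- range(len(fast_ema_periods)), so fast_ema_periods[i] is total: ported as getD i 0 (exact here).
def pvBucketWalk (f : List Int) (medium slow threshold : Int) :
    List Nat → List (List (Int × Int × Int)) → List (List (Int × Int × Int))
  | [], buckets => buckets
  | i :: rest, buckets =>
      let fast := f.getD i 0
      if threshold ≤ fast then buckets
      else pvBucketWalk f medium slow threshold rest
        (buckets.set i (buckets.getD i [] ++ [(fast, medium, slow)]))

-- Transliteration of B: sort fast indices by value, bucket per (medium, slow) pair, concatenate.
def build_ema_combinations_alt (fast_ema_periods : List Int) (medium_ema_periods : List Int) (slow_ema_periods : List Int) : List (Int × Int × Int) :=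
  let order := PySem.List.sorted (List.range fast_ema_periods.length) (fun i => fast_ema_periods.getD i 0)
  let buckets0 := fast_ema_periods.map (fun _ => ([] : List (Int × Int × Int)))
  let buckets := medium_ema_periods.foldl (fun buckets medium =>
    slow_ema_periods.foldl (fun buckets slow =>
      let threshold := if medium < slow then medium else slow
      pvBucketWalk fast_ema_periods medium slow threshold order buckets) buckets) buckets0
  buckets.foldl (fun result bucket => result ++ bucket) []

-- ===== PRECONDITION & SPEC =====
def Spec_build_ema_combinations (fast_ema_periods : List Int) (medium_ema_periods : List Int) (slow_ema_periods : List Int) (out : List (Int × Int × Int)) : Prop := out = build_ema_combinations_alt fast_ema_periods medium_ema_periods slow_ema_periods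
instance (fast_ema_periods : List Int) (medium_ema_periods : List Int) (slow_ema_periods : List Int) (out : List (Int × Int × Int)) : Decidable (Spec_build_ema_combinations fast_ema_periods medium_ema_periods slow_ema_periods out) := by unfold Spec_build_ema_combinations; infer_instance

-- ===== CLAIM (what is proved, stated in full; the proofs are below) =====
def Claim_equal_build_ema_combinations : Prop := ∀ (fast_ema_periods : List Int) (medium_ema_periods : List Int) (slow_ema_periods : List Int), Dom_build_ema_combinations fast_ema_periods medium_ema_periods slow_ema_periods → Spec_build_ema_combinations fast_ema_periods medium_ema_periods slow_ema_periods (build_ema_combinations fast_ema_periods medium_ema_periods slow_ema_periods)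

-- ===== LEMMAS AND PROOFS =====

theorem pv_slow_loop (fa m : Int) (ss : List Int) (acc : List (Int × Int × Int)) :
    ss.foldl (fun acc s => if fa < m ∧ fa < s then acc ++ [(fa, m, s)] else acc) acc
      = acc ++ (if fa < m then (ss.filter (fun s => fa < s)).map (fun s => (fa, m, s)) else []) := by
  by_cases h : fa < m
  · rw [if_pos h,
      PySem.List.foldl_append_ite (l := ss) (acc := acc)
        (p := fun s => fa < m ∧ fa < s) (f := fun s => (fa, m, s))]
    congr 2
    apply List.filter_congr
    intro s _
    simp [h]
  · rw [if_neg h]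
    induction ss generalizing acc with
    | nil => simp
    | cons sa st ihs => simp only [List.foldl_cons]; rw [if_neg (by tauto), ihs]

theorem pv_medium_loop (fa : Int) (ms ss : List Int) (acc : List (Int × Int × Int)) :
    ms.foldl (fun acc m => ss.foldl (fun acc s =>
        if fa < m ∧ fa < s then acc ++ [(fa, m, s)] else acc) acc) acc
      = acc ++ (ms.filter (fun m => fa < m)).flatMap
          (fun m => (ss.filter (fun s => fa < s)).map (fun s => (fa, m, s))) := by
  induction ms generalizing acc with
  | nil => simp
  | cons ma mt ihm =>
    simp only [List.foldl_cons, List.filter_cons]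
    rw [pv_slow_loop, ihm]
    by_cases h : fa < ma
    · simp [h]
    · simp [h]

theorem pv_fast_loop (f ms ss : List Int) (acc : List (Int × Int × Int)) :
    f.foldl (fun acc fa => ms.foldl (fun acc m => ss.foldl (fun acc s =>
        if fa < m ∧ fa < s then acc ++ [(fa, m, s)] else acc) acc) acc) acc
      = acc ++ f.flatMap (fun fa => (ms.filter (fun m => fa < m)).flatMap
          (fun m => (ss.filter (fun s => fa < s)).map (fun s => (fa, m, s)))) := by
  induction f generalizing acc with
  | nil => simp
  | cons fa ft ih =>
    simp only [List.foldl_cons, List.flatMap_cons]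
    rw [pv_medium_loop, ih, List.append_assoc]

-- Per fast value: A's filtered double loop equals a single filter over the (m, s) pair list.
theorem pv_per_fast (fa : Int) (ms ss : List Int) :
    (ms.filter (fun m => fa < m)).flatMap (fun m => (ss.filter (fun s => fa < s)).map (fun s => (fa, m, s)))
      = ((ms.flatMap (fun m => ss.map (fun s => (m, s)))).filter
          (fun p => decide (fa < p.1) && decide (fa < p.2))).map (fun p => (fa, p.1, p.2)) := by
  induction ms with
  | nil => simp
  | cons m mt ih =>
    simp only [List.flatMap_cons, List.filter_cons, List.filter_append, List.map_append,
      List.filter_map, List.map_map]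
    by_cases h : fa < m
    · simp [h, ih, Function.comp_def]
    · simp [h, ih, Function.comp_def]

-- The nested (medium, slow) foldl is the foldl over the flattened pair list.
theorem pv_pair_foldl {β : Type} (ms ss : List Int) (g : β → Int × Int → β) (b : β) :
    ms.foldl (fun b m => ss.foldl (fun b s => g b (m, s)) b) b
      = (ms.flatMap (fun m => ss.map (fun s => (m, s)))).foldl g b := by
  induction ms generalizing b with
  | nil => simp
  | cons m mt ih =>
    simp only [List.foldl_cons, List.flatMap_cons, List.foldl_append, List.foldl_map]
    exact ih _

theorem pv_walk_length (f : List Int) (m s t : Int) (ord : List Nat) (b : List (List (Int × Int × Int))) :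
    (pvBucketWalk f m s t ord b).length = b.length := by
  induction ord generalizing b with
  | nil => rfl
  | cons i rest ih =>
    simp only [pvBucketWalk]
    split
    · rfl
    · rw [ih]; simp

-- One pair's walk: bucket j gains the triple iff j occurs in the (sorted, nodup) order list
-- and its fast value is below the threshold.
theorem pv_walk_getD (f : List Int) (m s t : Int) (ord : List Nat)
    (hs : ord.Pairwise (fun a b => f.getD a 0 ≤ f.getD b 0)) (hn : ord.Nodup)
    (hlt : ∀ i ∈ ord, i < f.length)
    (b : List (List (Int × Int × Int))) (hb : b.length = f.length) (j : Nat) :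
    (pvBucketWalk f m s t ord b).getD j []
      = b.getD j [] ++ (if j ∈ ord ∧ f.getD j 0 < t then [(f.getD j 0, m, s)] else []) := by
  induction ord generalizing b with
  | nil => simp [pvBucketWalk]
  | cons i rest ih =>
    simp only [pvBucketWalk]
    rcases List.pairwise_cons.mp hs with ⟨hhead, hrest⟩
    rcases List.nodup_cons.mp hn with ⟨hni, hnr⟩
    by_cases hbreak : t ≤ f.getD i 0
    · rw [if_pos hbreak]
      have : ¬ (j ∈ i :: rest ∧ f.getD j 0 < t) := by
        rintro ⟨hmem, hjlt⟩
        rcases List.mem_cons.mp hmem with rfl | hmemr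
        · omega
        · have := hhead j hmemr; omega
      rw [if_neg this, List.append_nil]
    · rw [if_neg hbreak]
      rw [ih hrest hnr (fun x hx => hlt x (List.mem_cons_of_mem _ hx)) _ (by rw [← hb]; simp)]
      by_cases hji : j = i
      · subst hji
        have hjlen : j < b.length := by rw [hb]; exact hlt j List.mem_cons_self
        have hset : (b.set j (b.getD j [] ++ [(f.getD j 0, m, s)])).getD j []
            = b.getD j [] ++ [(f.getD j 0, m, s)] := by
          rw [List.getD_eq_getElem?_getD, List.getElem?_set_self' ]
          simp [hjlen]
        rw [hset, if_neg (fun h => hni h.1), List.append_nil,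
          if_pos (⟨List.mem_cons_self, by omega⟩ : j ∈ j :: rest ∧ f.getD j 0 < t)]
      · have hset : (b.set i (b.getD i [] ++ [(f.getD i 0, m, s)])).getD j [] = b.getD j [] := by
          rw [List.getD_eq_getElem?_getD, List.getElem?_set_ne (by omega)]
          rw [List.getD_eq_getElem?_getD]
        rw [hset]
        have : (j ∈ i :: rest ↔ j ∈ rest) := by
          constructor
          · intro h; rcases List.mem_cons.mp h with rfl | h; · omega
            · exact h
          · exact List.mem_cons_of_mem _
        simp only [this]

-- Folding the walk over a pair list accumulates per bucket exactly the filtered pairs, in order.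
theorem pv_pairs_foldl_getD (f : List Int) (ord : List Nat)
    (hs : ord.Pairwise (fun a b => f.getD a 0 ≤ f.getD b 0)) (hn : ord.Nodup)
    (hlt : ∀ i ∈ ord, i < f.length) (hmem : ∀ i, i < f.length → i ∈ ord)
    (P : List (Int × Int)) (b : List (List (Int × Int × Int))) (hb : b.length = f.length)
    (j : Nat) (hj : j < f.length) :
    (P.foldl (fun buckets p =>
        pvBucketWalk f p.1 p.2 (if p.1 < p.2 then p.1 else p.2) ord buckets) b).getD j []
      = b.getD j [] ++ (P.filter (fun p => decide (f.getD j 0 < p.1) && decide (f.getD j 0 < p.2))).map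
          (fun p => (f.getD j 0, p.1, p.2)) := by
  induction P generalizing b with
  | nil => simp
  | cons p pt ih =>
    simp only [List.foldl_cons]
    rw [ih _ (by rw [pv_walk_length]; exact hb)]
    rw [pv_walk_getD f p.1 p.2 _ ord hs hn hlt b hb j]
    have hjord : j ∈ ord := hmem j hj
    by_cases hcond : f.getD j 0 < p.1 ∧ f.getD j 0 < p.2
    · have ht : f.getD j 0 < (if p.1 < p.2 then p.1 else p.2) := by
        rcases hcond with ⟨h1, h2⟩; split <;> omega
      rw [List.filter_cons_of_pos (by simp only [Bool.and_eq_true, decide_eq_true_eq]; exact hcond),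
        if_pos (⟨hjord, ht⟩ : j ∈ ord ∧ f.getD j 0 < if p.1 < p.2 then p.1 else p.2),
        List.append_assoc, List.map_cons]
      simp
    · have ht : ¬ f.getD j 0 < (if p.1 < p.2 then p.1 else p.2) := by
        rcases not_and_or.mp hcond with h | h <;> (split <;> omega)
      rw [List.filter_cons_of_neg (by simp only [Bool.and_eq_true, decide_eq_true_eq]; exact hcond),
        if_neg (fun hc => ht hc.2), List.append_nil]

theorem pv_concat (bs : List (List (Int × Int × Int))) (acc : List (Int × Int × Int)) :
    bs.foldl (fun result bucket => result ++ bucket) acc = acc ++ bs.flatten := by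
  induction bs generalizing acc with
  | nil => simp
  | cons x xs ih => simp [List.foldl_cons, ih]

-- ===== VERDICT (by name: the statement is the Claim_ definition above) =====
theorem build_ema_combinations_spec : Claim_equal_build_ema_combinations := by
  intro f ms ss _
  unfold Spec_build_ema_combinations build_ema_combinations build_ema_combinations_alt
  rw [pv_fast_loop]
  simp only [List.nil_append]
  set ord := PySem.List.sorted (List.range f.length) (fun i => f.getD i 0) with hord
  have hperm : ord.Perm (List.range f.length) := PySem.List.sorted_perm _ _ _
  have hs : ord.Pairwise (fun a b => f.getD a 0 ≤ f.getD b 0) := by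
    have := PySem.List.sorted_pairwise (xs := List.range f.length) (key := fun i => f.getD i 0)
    simpa [hord] using this
  have hn : ord.Nodup := hperm.nodup_iff.mpr (List.nodup_range)
  have hlt : ∀ i ∈ ord, i < f.length := fun i hi =>
    List.mem_range.mp (hperm.mem_iff.mp hi)
  have hmem : ∀ i, i < f.length → i ∈ ord := fun i hi =>
    hperm.mem_iff.mpr (List.mem_range.mpr hi)
  set P := ms.flatMap (fun m => ss.map (fun s => (m, s))) with hP
  rw [pv_pair_foldl ms ss
    (fun buckets p => pvBucketWalk f p.1 p.2 (if p.1 < p.2 then p.1 else p.2) ord buckets)]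
  set B := P.foldl (fun buckets p =>
      pvBucketWalk f p.1 p.2 (if p.1 < p.2 then p.1 else p.2) ord buckets)
      (f.map fun _ => ([] : List (Int × Int × Int))) with hB
  rw [pv_concat]
  simp only [List.nil_append]
  have hBlen : B.length = f.length := by
    rw [hB]
    have : ∀ (Q : List (Int × Int)) (b : List (List (Int × Int × Int))),
        (Q.foldl (fun buckets p => pvBucketWalk f p.1 p.2 (if p.1 < p.2 then p.1 else p.2) ord buckets) b).length = b.length := by
      intro Q
      induction Q with
      | nil => intro b; rfl
      | cons q qt ih => intro b; simp only [List.foldl_cons]; rw [ih, pv_walk_length]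
    rw [this]; simp
  have hBj : ∀ j, j < f.length → B.getD j []
      = (P.filter (fun p => decide (f.getD j 0 < p.1) && decide (f.getD j 0 < p.2))).map
          (fun p => (f.getD j 0, p.1, p.2)) := by
    intro j hj
    rw [hB, pv_pairs_foldl_getD f ord hs hn hlt hmem P _ (by simp) j hj]
    simp
  -- identify B with the per-index chunks and flatten
  have hBeq : B = (List.range f.length).map (fun j =>
      (P.filter (fun p => decide (f.getD j 0 < p.1) && decide (f.getD j 0 < p.2))).map
        (fun p => (f.getD j 0, p.1, p.2))) := by
    apply List.ext_getElem
    · simp [hBlen]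
    · intro j h1 h2
      have hj : j < f.length := by simpa [hBlen] using h1
      have := hBj j hj
      rw [List.getD_eq_getElem?_getD, List.getElem?_eq_getElem h1] at this
      simp only [Option.getD_some] at this
      simp [this]
  rw [hBeq]
  -- left side: rewrite A's flatMap over f as flatMap over indices
  have hf : f.flatMap (fun fa => (ms.filter (fun m => fa < m)).flatMap
        (fun m => (ss.filter (fun s => fa < s)).map (fun s => (fa, m, s))))
      = ((List.range f.length).map (fun j =>
          (P.filter (fun p => decide (f.getD j 0 < p.1) && decide (f.getD j 0 < p.2))).map
            (fun p => (f.getD j 0, p.1, p.2)))).flatten := by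
    rw [List.flatten_eq_flatMap, List.flatMap_map]
    conv_lhs => rw [show f = (List.range f.length).map (fun j => f.getD j 0) by
      apply List.ext_getElem
      · simp
      · intro j h1 h2
        simp at h2
        simp [List.getD_eq_getElem?_getD, List.getElem?_eq_getElem h2]]
    rw [List.flatMap_map]
    apply List.flatMap_congr
    intro x _
    simpa using pv_per_fast (f.getD x 0) ms ss
  exact hf
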